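-- pv_equiv track=rewrite | github.com/andrew-maclachlan/project-euler | projecteuler/projecteuler/problem_31.py | _smallest_representation
-- ===== SOURCE A (Python) =====
-- def _smallest_representation(price, coins):
--     # Smallest representation of a price
--     smallest_represention = ()
--
--     sub_price = price
--
--     while sub_price >= min(coins):
--         # Largest coin that is smaller than or equal to the sub_price
--         largest_coin = max(coin for coin in coins if coin <= sub_price)
--
--         # Add the largest available coin to the total and subtract from sub_price
--         smallest_represention += (largest_coin,)
--         sub_price -= largest_coin
--
--     return smallest_represention
-- ===== SOURCE B (Python) =====
-- def _smallest_representation(price, coins):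
--     # Sort once (a copy, descending) and make one divisive pass:
--     # each coin contributes sub_price // coin copies, then sub_price %= coin.
--     rep = ()
--     sub_price = price
--     for coin in sorted(coins, reverse=True):
--         if sub_price >= coin:
--             rep += (coin,) * (sub_price // coin)
--             sub_price %= coin
--     return rep
-- ===== Notes on version B (the rewrite author's own statement) =====
-- stated objective: alternative
-- what changed: Replaces the per-step rescan (while-loop that each iteration recomputes min(coins) and max(coin<=sub_price) and appends one coin) by sorting the coins once in descending order and making a single divisive pass: each coin contributes sub_price // coin copies at once, then sub_price %= coin.
import Mathlib
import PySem

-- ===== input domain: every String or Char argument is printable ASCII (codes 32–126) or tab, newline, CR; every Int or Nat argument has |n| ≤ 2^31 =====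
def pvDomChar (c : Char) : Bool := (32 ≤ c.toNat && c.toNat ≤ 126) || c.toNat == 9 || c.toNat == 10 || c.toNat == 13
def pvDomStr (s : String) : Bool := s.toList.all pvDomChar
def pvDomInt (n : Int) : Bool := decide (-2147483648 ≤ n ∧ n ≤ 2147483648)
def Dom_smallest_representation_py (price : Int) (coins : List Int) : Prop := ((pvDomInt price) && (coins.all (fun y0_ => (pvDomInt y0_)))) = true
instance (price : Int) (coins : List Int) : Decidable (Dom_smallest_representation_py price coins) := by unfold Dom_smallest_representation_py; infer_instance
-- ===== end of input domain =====

-- B sorts the coins once (descending, a copy) and makes a single divisive pass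
-- (count = sub_price // coin, then sub_price %= coin) instead of A's per-step
-- rescan-and-subtract while loop; objective: alternative (one pass over the sorted coins).


-- ===== PORT A =====
-- A's while loop, fueled (the fuel only makes the recursion total; under
-- Pre_ the loop runs at most price.toNat times, so the fuel is never exhausted).
def aLoop (coins : List Int) : Nat → Int → List Int → List Int
  | 0, _, acc => acc
  | fuel + 1, sub_price, acc =>
    match PySem.List.min? coins (fun x => x) with
    | none => acc          -- min(()) raises ValueError: excluded by Pre_
    | some m =>
      if m ≤ sub_price then
        match PySem.List.max? (coins.filter (fun coin => decide (coin ≤ sub_price))) (fun x => x) with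
        | none => acc      -- unreachable: min(coins) itself qualifies
        | some largest_coin => aLoop coins fuel (sub_price - largest_coin) (acc ++ [largest_coin])
      else acc

def smallest_representation_py (price : Int) (coins : List Int) : List Int :=
  aLoop coins (price.toNat + 1) price []

-- ===== PORT B =====
def smallest_representation_py_alt (price : Int) (coins : List Int) : List Int :=
  ((PySem.List.sorted coins (fun x => x) (reverse := true)).foldl
    (fun (st : List Int × Int) coin =>
      if coin ≤ st.2 then
        (st.1 ++ List.replicate (PySem.Int.floordiv st.2 coin).toNat coin,
         PySem.Int.mod st.2 coin)
      else st)
    ([], price)).1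

-- ===== PRECONDITION & SPEC =====
-- Pre_ excludes exactly the inputs where A does not return: coins = [] (min(())
-- raises ValueError) and coin lists containing a coin ≤ 0 with price ≥ min(coins),
-- on which A's while loop never terminates (sub_price can never drop below a
-- nonpositive minimum).
def Pre_smallest_representation_py (price : Int) (coins : List Int) : Prop :=
  coins ≠ [] ∧ ((∀ c ∈ coins, 1 ≤ c) ∨ (∀ c ∈ coins, price < c))
instance (price : Int) (coins : List Int) : Decidable (Pre_smallest_representation_py price coins) := by unfold Pre_smallest_representation_py; infer_instance
def pvWitness_smallest_representation_py : Int × List Int := (11, [1, 2, 5])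

def Spec_smallest_representation_py (price : Int) (coins : List Int) (out : List Int) : Prop := out = smallest_representation_py_alt price coins
instance (price : Int) (coins : List Int) (out : List Int) : Decidable (Spec_smallest_representation_py price coins out) := by unfold Spec_smallest_representation_py; infer_instance

-- ===== CLAIM (what is proved, stated in full; the proofs are below) =====
def Claim_equal_smallest_representation_py : Prop := ∀ (price : Int) (coins : List Int), Dom_smallest_representation_py price coins → Pre_smallest_representation_py price coins → Spec_smallest_representation_py price coins (smallest_representation_py price coins)

-- ===== LEMMAS AND PROOFS =====

-- B's fold, with the accumulator peeled off: structural recursion over the sorted list.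
def canon : List Int → Int → List Int
  | [], _ => []
  | c :: rest, r =>
    if c ≤ r then List.replicate (PySem.Int.floordiv r c).toNat c ++ canon rest (PySem.Int.mod r c)
    else canon rest r

theorem canon_foldl (s : List Int) (r : Int) (acc : List Int) :
    (s.foldl (fun (st : List Int × Int) coin =>
      if coin ≤ st.2 then
        (st.1 ++ List.replicate (PySem.Int.floordiv st.2 coin).toNat coin, PySem.Int.mod st.2 coin)
      else st) (acc, r)).1 = acc ++ canon s r := by
  induction s generalizing r acc with
  | nil => simp [canon]
  | cons c rest ih =>
    simp only [List.foldl_cons, canon]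
    by_cases h : c ≤ r
    · simp [h, ih, List.append_assoc]
    · simp [h, ih]

theorem alt_eq_canon (price : Int) (coins : List Int) :
    smallest_representation_py_alt price coins
      = canon (PySem.List.sorted coins (fun x => x) (reverse := true)) price := by
  unfold smallest_representation_py_alt
  simpa using canon_foldl (PySem.List.sorted coins (fun x => x) (reverse := true)) price []

theorem canon_of_lt (s : List Int) (r : Int) (h : ∀ c ∈ s, r < c) : canon s r = [] := by
  induction s with
  | nil => rfl
  | cons c rest ih =>
    have hc : r < c := h c (List.mem_cons_self ..)
    simp only [canon, if_neg (by omega : ¬ c ≤ r)]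
    exact ih (fun x hx => h x (List.mem_cons_of_mem _ hx))

-- The one step of A's greedy loop, read off canon: if some coin is ≤ r then canon
-- emits the largest such coin L and continues at r - L.
theorem canon_step (s : List Int) (r L : Int)
    (hpos : ∀ c ∈ s, 1 ≤ c)
    (hsorted : s.Pairwise (fun a b => b ≤ a))
    (hL : L ∈ s) (hLr : L ≤ r) (hmax : ∀ c ∈ s, c ≤ r → c ≤ L) :
    canon s r = L :: canon s (r - L) := by
  induction s generalizing r with
  | nil => cases hL
  | cons c rest ih =>
    have hc1 : 1 ≤ c := hpos c (List.mem_cons_self ..)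
    have hL1 : 1 ≤ L := hpos L hL
    by_cases hcr : c ≤ r
    · -- the head coin fits, so L = c
      have hLc : L ≤ c := by
        rcases List.mem_cons.mp hL with h | h
        · omega
        · exact (List.pairwise_cons.mp hsorted).1 L h
      have hcL : c ≤ L := hmax c (List.mem_cons_self ..) hcr
      have hLeq : L = c := le_antisymm hLc hcL
      subst hLeq
      have hdpos : (0 : Int) < L := by omega
      have q1 : 1 ≤ PySem.Int.floordiv r L := by
        rw [PySem.Int.le_floordiv_iff_mul_le hdpos]; omega
      have hmodlt : PySem.Int.mod r L < L := PySem.Int.mod_lt r hdpos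
      have hmodnn : 0 ≤ PySem.Int.mod r L := PySem.Int.mod_nonneg r hdpos
      have hfm := PySem.Int.floordiv_mul_add_mod r L
      simp only [canon, if_pos hcr]
      by_cases h2 : L ≤ r - L
      · -- r - L still ≥ L: the recursive canon fires on the head again
        simp only [if_pos h2]
        have hq2 : PySem.Int.floordiv (r - L) L = PySem.Int.floordiv r L - 1 := by
          rw [PySem.Int.floordiv_eq_iff_of_pos hdpos]
          constructor <;> nlinarith [hfm, hmodlt, hmodnn]
        have hm2 : PySem.Int.mod (r - L) L = PySem.Int.mod r L := by
          have := PySem.Int.floordiv_mul_add_mod (r - L) L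
          have h1 := PySem.Int.mod_lt (r - L) hdpos
          have h0 := PySem.Int.mod_nonneg (r - L) hdpos
          nlinarith [hfm, hq2, hmodlt, hmodnn]
        rw [hq2, hm2]
        have hq1' : (PySem.Int.floordiv r L).toNat = (PySem.Int.floordiv r L - 1).toNat + 1 := by omega
        rw [hq1', List.replicate_succ]
        simp
      · -- r - L < L: exactly one copy of the head, and r % L = r - L
        have hq : PySem.Int.floordiv r L = 1 := by
          rw [PySem.Int.floordiv_eq_iff_of_pos hdpos]; omega
        have hm : PySem.Int.mod r L = r - L := by nlinarith [hfm, hq]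
        rw [hq, hm]
        simp only [if_neg (show ¬ L ≤ r - L by omega)]
        simp
    · -- head coin too big: L lives in the tail; r - L < c too, so both sides skip the head
      have hLrest : L ∈ rest := by
        rcases List.mem_cons.mp hL with h | h
        · omega
        · exact h
      simp only [canon, if_neg hcr, if_neg (by omega : ¬ c ≤ r - L)]
      exact ih r (fun x hx => hpos x (List.mem_cons_of_mem _ hx))
        (List.pairwise_cons.mp hsorted).2 hLrest hLr
        (fun x hx hxr => hmax x (List.mem_cons_of_mem _ hx) hxr)

-- A's fueled loop equals acc ++ canon (sorted coins) r when the fuel dominates r.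
theorem aLoop_eq_canon (coins : List Int) (fuel : Nat) (r : Int) (acc : List Int)
    (hne : coins ≠ [])
    (hpos : ∀ c ∈ coins, 1 ≤ c)
    (hfuel : r.toNat < fuel) :
    aLoop coins fuel r acc
      = acc ++ canon (PySem.List.sorted coins (fun x => x) (reverse := true)) r := by
  induction fuel generalizing r acc with
  | zero => omega
  | succ fuel ih =>
    have hmem : ∀ c, c ∈ PySem.List.sorted coins (fun x => x) (reverse := true) ↔ c ∈ coins := by
      intro c; exact PySem.List.mem_sorted ..
    obtain ⟨m, hm⟩ : ∃ m, PySem.List.min? coins (fun x => x) = some m := by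
      cases h : PySem.List.min? coins (fun x => x) with
      | none => exact absurd ((PySem.List.min?_eq_none_iff ..).mp h) hne
      | some m => exact ⟨m, rfl⟩
    have hmmem : m ∈ coins := PySem.List.min?_mem hm
    have hmmin : ∀ y ∈ coins, m ≤ y := PySem.List.min?_isMin hm
    simp only [aLoop, hm]
    by_cases hmr : m ≤ r
    · simp only [if_pos hmr]
      obtain ⟨L, hLdef⟩ : ∃ L, PySem.List.max? (coins.filter (fun coin => decide (coin ≤ r))) (fun x => x) = some L := by
        cases h : PySem.List.max? (coins.filter (fun coin => decide (coin ≤ r))) (fun x => x) with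
        | none =>
          have : coins.filter (fun coin => decide (coin ≤ r)) = [] := (PySem.List.max?_eq_none_iff ..).mp h
          have : m ∉ coins.filter (fun coin => decide (coin ≤ r)) := by simp [this]
          simp [List.mem_filter, hmmem, hmr] at this
        | some L => exact ⟨L, rfl⟩
      have hLmem' := PySem.List.max?_mem hLdef
      have hLmem : L ∈ coins := (List.mem_filter.mp hLmem').1
      have hLr : L ≤ r := by simpa using (List.mem_filter.mp hLmem').2
      have hLmax : ∀ c ∈ coins, c ≤ r → c ≤ L := by
        intro c hc hcr
        exact PySem.List.max?_isMax hLdef c (List.mem_filter.mpr ⟨hc, by simpa using hcr⟩)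
      have hL1 : 1 ≤ L := hpos L hLmem
      simp only [hLdef]
      rw [ih (r - L) (acc ++ [L]) (by omega)]
      rw [canon_step _ r L (fun c hc => hpos c ((hmem c).mp hc))
            (PySem.List.sorted_pairwise_rev ..) ((hmem L).mpr hLmem) hLr
            (fun c hc => hLmax c ((hmem c).mp hc))]
      simp
    · simp only [if_neg hmr]
      rw [canon_of_lt]
      · simp
      · intro c hc
        have := hmmin c ((hmem c).mp hc)
        omega

-- ===== VERDICT (by name: the statement is the Claim_ definition above) =====
theorem smallest_representation_py_spec : Claim_equal_smallest_representation_py := by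
  intro price coins _ hpre
  obtain ⟨hne, hcase⟩ := hpre
  unfold Spec_smallest_representation_py
  rw [alt_eq_canon]
  rcases hcase with hpos | hlt
  · exact aLoop_eq_canon coins (price.toNat + 1) price [] hne hpos (by omega)
  · -- price below every coin: both sides return []
    obtain ⟨m, hm⟩ : ∃ m, PySem.List.min? coins (fun x => x) = some m := by
      cases h : PySem.List.min? coins (fun x => x) with
      | none => exact absurd ((PySem.List.min?_eq_none_iff ..).mp h) hne
      | some m => exact ⟨m, rfl⟩
    have hmr : ¬ m ≤ price := by
      have := hlt m (PySem.List.min?_mem hm); omega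
    unfold smallest_representation_py
    simp only [aLoop, hm, if_neg hmr]
    rw [canon_of_lt]
    intro c hc
    exact hlt c ((PySem.List.mem_sorted ..).mp hc)
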